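-- pv_equiv track=rewrite | github.com/Ladygina/files_ | task1.py | get_dishes_names
-- ===== SOURCE A (Python) =====
-- def get_dishes_names(f_read):
--   names = []
--   line_prev = False
--   for line in (f_read):
--     if line != '\n':
--       if line_prev == False:
--         names.append(line[:-1])
--       line_prev = True
--     else:
--       line_prev = False
--
--   return names
-- ===== SOURCE B (Python) =====
-- def get_dishes_names(f_read):
--     # Staged decomposition: first split the line list into maximal blocks of
--     # non-separator lines (two-level index scan, no carry-forward flag),
--     # then map each block to its first line minus the trailing character.
--     def blocks(lines):
--         res = []
--         i = 0
--         n = len(lines)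
--         while i < n:
--             if lines[i] == '\n':
--                 i += 1
--                 continue
--             j = i + 1
--             while j < n and lines[j] != '\n':
--                 j += 1
--             res.append(lines[i:j])
--             i = j
--         return res
--     return [b[0][:-1] for b in blocks(f_read)]
-- ===== Notes on version B (the rewrite author's own statement) =====
-- stated objective: alternative
-- what changed: Replaced A's single pass with a carried line_prev flag by a staged group-then-project shape: an inner scanner splits the line list into maximal blocks of non-separator lines, and a second pass maps each block to its first line's [:-1] slice.
import Mathlib
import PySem

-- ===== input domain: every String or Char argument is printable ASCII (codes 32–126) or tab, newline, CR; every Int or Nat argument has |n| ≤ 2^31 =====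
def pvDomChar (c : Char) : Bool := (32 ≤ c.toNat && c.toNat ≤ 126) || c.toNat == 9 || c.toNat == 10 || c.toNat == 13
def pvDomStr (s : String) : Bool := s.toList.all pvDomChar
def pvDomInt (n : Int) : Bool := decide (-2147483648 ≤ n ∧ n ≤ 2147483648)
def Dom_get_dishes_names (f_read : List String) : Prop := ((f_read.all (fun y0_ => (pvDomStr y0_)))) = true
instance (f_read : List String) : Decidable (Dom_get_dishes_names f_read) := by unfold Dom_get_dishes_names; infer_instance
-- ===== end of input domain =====

-- B replaces A's carried boolean flag by a staged shape: split into maximal non-separator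
-- blocks, then map each block to its first line's [:-1] slice (same cost, different decomposition).

-- ===== PORT A =====
-- A: one loop, state (names, line_prev); append line[:-1] when line ≠ '\n' and line_prev is false
def get_dishes_names (f_read : List String) : List String :=
  (f_read.foldl (fun (st : List String × Bool) line =>
      if line ≠ "\n" then
        (if st.2 = false then st.1 ++ [PySem.Str.slice line none (some (-1))] else st.1, true)
      else
        (st.1, false))
    ([], false)).1

-- ===== PORT B =====
-- B's block scanner: skip separator lines, otherwise scan forward to the end of the
-- current block (takeWhile/dropWhile = the inner `while j < n and lines[j] != '\n'` scan)
def pvBlocks : List String → List (List String)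
  | [] => []
  | l :: rest =>
    if l = "\n" then pvBlocks rest
    else (l :: rest.takeWhile (fun s => !(s == "\n"))) ::
         pvBlocks (rest.dropWhile (fun s => !(s == "\n")))
termination_by l => l.length
decreasing_by
  · simp
  · have := List.length_dropWhile_le (fun s => !(s == "\n")) rest
    simp; omega

-- each block is nonempty by construction, so b[0] is its head (headD "" is exact here)
def get_dishes_names_alt (f_read : List String) : List String :=
  (pvBlocks f_read).map (fun b => PySem.Str.slice (b.headD "") none (some (-1)))

-- ===== PRECONDITION & SPEC =====
def Spec_get_dishes_names (f_read : List String) (out : List String) : Prop := out = get_dishes_names_alt f_read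
instance (f_read : List String) (out : List String) : Decidable (Spec_get_dishes_names f_read out) := by unfold Spec_get_dishes_names; infer_instance

-- ===== CLAIM =====
def Claim_equal_get_dishes_names : Prop := ∀ (f_read : List String), Dom_get_dishes_names f_read → Spec_get_dishes_names f_read (get_dishes_names f_read)

-- ===== LEMMAS AND PROOFS =====

-- abbreviation used only in the proofs below
def pvStep (st : List String × Bool) (line : String) : List String × Bool :=
  if line ≠ "\n" then
    (if st.2 = false then st.1 ++ [PySem.Str.slice line none (some (-1))] else st.1, true)
  else
    (st.1, false)

-- With the flag set, A's loop skips the rest of the current block.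
theorem pvFold_true (l : List String) : ∀ (acc : List String),
    (l.foldl pvStep (acc, true)).1
      = ((l.dropWhile (fun s => !(s == "\n"))).foldl pvStep (acc, false)).1 := by
  induction l with
  | nil => intro acc; simp
  | cons c rest ih =>
    intro acc
    by_cases hc : c = "\n"
    · subst hc; simp [pvStep]
    · simp [hc, pvStep, ih]

-- With the flag clear, A's loop from acc produces acc ++ B's result.
theorem pvFold_false (n : ℕ) : ∀ (l : List String), l.length ≤ n → ∀ (acc : List String),
    (l.foldl pvStep (acc, false)).1 = acc ++ get_dishes_names_alt l := by
  induction n with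
  | zero =>
    intro l hl acc
    have : l = [] := List.eq_nil_of_length_eq_zero (Nat.le_zero.mp hl)
    subst this; simp [get_dishes_names_alt, pvBlocks]
  | succ n ih =>
    intro l hl acc
    match l with
    | [] => simp [get_dishes_names_alt, pvBlocks]
    | c :: rest =>
      simp only [List.length_cons, Nat.succ_le_succ_iff] at hl
      by_cases hc : c = "\n"
      · subst hc
        simp only [List.foldl_cons, pvStep, ne_eq, not_true_eq_false, if_false]
        rw [ih rest hl acc]
        simp [get_dishes_names_alt, pvBlocks]
      · simp only [List.foldl_cons, pvStep, ne_eq, hc, not_false_eq_true, if_true]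
        rw [pvFold_true]
        have hlen := List.length_dropWhile_le (fun s => !(s == "\n")) rest
        rw [ih _ (le_trans hlen hl)]
        simp [get_dishes_names_alt, pvBlocks, hc]

-- ===== VERDICT =====
theorem get_dishes_names_spec : Claim_equal_get_dishes_names := by
  intro f_read _
  show (f_read.foldl pvStep ([], false)).1 = get_dishes_names_alt f_read
  exact pvFold_false f_read.length f_read le_rfl []
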